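-- pv_equiv track=rewrite | github.com/nikbpetrov/nikbpetrov.github.io | combine_datapipe_sessions.py | summarize_gaps
-- ===== SOURCE A (Python) =====
-- def summarize_gaps(trial_indices: list[int]) -> str | None:
--     unique_sorted = sorted(set(trial_indices))
--     gaps: list[str] = []
--     for left, right in zip(unique_sorted, unique_sorted[1:]):
--         if right - left > 1:
--             gaps.append(f"{left + 1}-{right - 1}")
--     if not gaps:
--         return None
--     preview = ", ".join(gaps[:10])
--     if len(gaps) > 10:
--         preview += ", ..."
--     return f"Gaps in trial_index sequence detected: {preview}"
-- ===== SOURCE B (Python) =====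
-- def summarize_gaps(trial_indices: list[int]) -> str | None:
--     # Hash-set boundary detection instead of sorting the data: a gap's left
--     # edge is x+1 for present x with x+1 absent (x not the max); its right
--     # edge is y-1 for present y with y-1 absent (y not the min).  Sorting
--     # only the few boundary points and zipping pairs each gap's edges.
--     present = set(trial_indices)
--     if not present:
--         return None
--     mn, mx = min(present), max(present)
--     starts = sorted(x + 1 for x in present if x != mx and x + 1 not in present)
--     ends = sorted(y - 1 for y in present if y != mn and y - 1 not in present)
--     gaps = [f"{a}-{b}" for a, b in zip(starts, ends)]
--     if not gaps:
--         return None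
--     preview = ", ".join(gaps[:10])
--     if len(gaps) > 10:
--         preview += ", ..."
--     return f"Gaps in trial_index sequence detected: {preview}"
-- ===== Notes on version B (the rewrite author's own statement) =====
-- stated objective: alternative
-- what changed: B never sorts the data or scans adjacent pairs: it detects each gap's edges with hash-set membership tests (x present with x+1 absent gives a left edge, y present with y-1 absent gives a right edge), sorts only those few boundary points and zips them into ranges.
import Mathlib
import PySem

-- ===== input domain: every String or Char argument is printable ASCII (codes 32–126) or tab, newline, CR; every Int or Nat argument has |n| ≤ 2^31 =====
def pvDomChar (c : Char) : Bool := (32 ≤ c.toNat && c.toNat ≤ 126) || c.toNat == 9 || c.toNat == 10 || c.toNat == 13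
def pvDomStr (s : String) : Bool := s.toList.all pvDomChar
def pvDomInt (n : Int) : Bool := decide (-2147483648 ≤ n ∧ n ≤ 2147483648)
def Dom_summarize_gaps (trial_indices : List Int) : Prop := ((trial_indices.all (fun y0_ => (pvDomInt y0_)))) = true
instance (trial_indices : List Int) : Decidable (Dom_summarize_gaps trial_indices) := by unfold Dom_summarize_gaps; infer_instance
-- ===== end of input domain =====

-- B finds each gap's edges by hash-set boundary tests (x present, x+1 absent / y present, y-1 absent)
-- and sorts only those boundary points, instead of sorting all values and scanning adjacent pairs (alternative algorithm).

-- ===== PORT A =====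
def summarize_gaps (trial_indices : List Int) : Option String :=
  let unique_sorted := PySem.List.sorted (PySem.Set.ofList trial_indices) (fun x => x) false
  let gaps := (unique_sorted.zip (PySem.List.slice unique_sorted (some 1) none)).foldl
    (fun acc lr =>
      if lr.2 - lr.1 > 1 then
        acc ++ [PySem.Int.toStr (lr.1 + 1) ++ "-" ++ PySem.Int.toStr (lr.2 - 1)]
      else acc) []
  if gaps = [] then none
  else
    let preview := PySem.Str.join ", " (PySem.List.slice gaps none (some 10))
    let preview := if 10 < gaps.length then preview ++ ", ..." else preview
    some ("Gaps in trial_index sequence detected: " ++ preview)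

-- ===== PORT B =====
def summarize_gaps_alt (trial_indices : List Int) : Option String :=
  let present := PySem.Set.ofList trial_indices
  if present = [] then none
  else
    -- present ≠ [] here, so min?/max? are 'some'; the fallback branch is a totality guard only
    match PySem.List.min? present (fun x => x), PySem.List.max? present (fun x => x) with
    | some mn, some mx =>
      let starts := PySem.List.sorted
        ((present.filter (fun x => x != mx && ! present.contains (x + 1))).map (fun x => x + 1))
        (fun x => x) false
      let ends := PySem.List.sorted
        ((present.filter (fun y => y != mn && ! present.contains (y - 1))).map (fun y => y - 1))
        (fun x => x) false
      let gaps := (starts.zip ends).map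
        (fun ab => PySem.Int.toStr ab.1 ++ "-" ++ PySem.Int.toStr ab.2)
      if gaps = [] then none
      else
        let preview := PySem.Str.join ", " (PySem.List.slice gaps none (some 10))
        let preview := if 10 < gaps.length then preview ++ ", ..." else preview
        some ("Gaps in trial_index sequence detected: " ++ preview)
    | _, _ => none

-- ===== PRECONDITION & SPEC =====
def Spec_summarize_gaps (trial_indices : List Int) (out : Option String) : Prop := out = summarize_gaps_alt trial_indices
instance (trial_indices : List Int) (out : Option String) : Decidable (Spec_summarize_gaps trial_indices out) := by unfold Spec_summarize_gaps; infer_instance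

-- ===== CLAIM (what is proved, stated in full; the proofs are below) =====
def Claim_equal_summarize_gaps : Prop := ∀ (trial_indices : List Int), Dom_summarize_gaps trial_indices → Spec_summarize_gaps trial_indices (summarize_gaps trial_indices)

-- ===== LEMMAS AND PROOFS =====

-- the (left present value, right present value) pair around each gap, in increasing order
def gapPairs : Int → List Int → List (Int × Int)
  | _, [] => []
  | p, x :: xs => (if x - p > 1 then [(p, x)] else []) ++ gapPairs x xs

theorem foldl_zip_eq_gapPairs (t : List Int) : ∀ (h : Int) (acc : List String),
    (((h :: t).zip t).foldl
      (fun acc lr =>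
        if lr.2 - lr.1 > 1 then
          acc ++ [PySem.Int.toStr (lr.1 + 1) ++ "-" ++ PySem.Int.toStr (lr.2 - 1)]
        else acc) acc)
    = acc ++ (gapPairs h t).map
        (fun q => PySem.Int.toStr (q.1 + 1) ++ "-" ++ PySem.Int.toStr (q.2 - 1)) := by
  induction t with
  | nil => intro h acc; simp [gapPairs]
  | cons x xs ih =>
    intro h acc
    simp only [List.zip_cons_cons, List.foldl_cons, ih x, gapPairs]
    split_ifs with hc <;> simp

-- B's start-boundary filter over the strictly sorted unique list picks exactly the gaps' left present values
theorem starts_filter (memb : Int → Bool) (mx : Int) :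
    ∀ (t : List Int) (h : Int),
    (h :: t).Pairwise (· < ·) →
    (∀ z, h < z → (memb z = true ↔ z ∈ h :: t)) →
    mx ∈ h :: t → (∀ y ∈ h :: t, y ≤ mx) →
    (h :: t).filter (fun x => x != mx && ! memb (x + 1))
      = (gapPairs h t).map (fun q => q.1) := by
  intro t
  induction t with
  | nil =>
    intro h _ _ hmx _
    have : mx = h := by simpa using hmx
    simp [gapPairs, this]
  | cons b rest ih =>
    intro h hpw hmemb hmx hle
    have hb : h < b := (List.pairwise_cons.mp hpw).1 b (by simp)
    have hrest : ∀ y ∈ rest, b < y := fun y hy =>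
      (List.pairwise_cons.mp (List.pairwise_cons.mp hpw).2).1 y hy
    have hhmx : h ≠ mx := by
      have : b ≤ mx := hle b (by simp)
      omega
    have hm1 : memb (h + 1) = true ↔ h + 1 = b := by
      rw [hmemb (h + 1) (by omega)]
      constructor
      · intro hmem
        rcases List.mem_cons.mp hmem with heq | hmem
        · omega
        · rcases List.mem_cons.mp hmem with heq | hmem
          · exact heq
          · have := hrest _ hmem; omega
      · intro he; simp [he]
    have hrec := ih b (List.pairwise_cons.mp hpw).2
      (fun z hz => by
        rw [hmemb z (by omega)]
        constructor
        · intro hmem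
          rcases List.mem_cons.mp hmem with heq | hmem
          · omega
          · exact hmem
        · intro hmem; exact List.mem_cons_of_mem _ hmem)
      (by
        rcases List.mem_cons.mp hmx with heq | hmem
        · omega
        · exact hmem)
      (fun y hy => hle y (List.mem_cons_of_mem _ hy))
    by_cases hgap : b - h > 1
    · have hmf : memb (h + 1) = false := by
        rcases Bool.eq_false_or_eq_true (memb (h + 1)) with ht | hf
        · exfalso; have := hm1.mp ht; omega
        · exact hf
      have hPh : ((h != mx) && ! memb (h + 1)) = true := by
        simp [hhmx, hmf]
      rw [List.filter_cons, hPh]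
      simp only [if_true, gapPairs, if_pos hgap, List.singleton_append, List.map_cons]
      rw [hrec]
    · have hmt : memb (h + 1) = true := hm1.mpr (by omega)
      have hPh : ((h != mx) && ! memb (h + 1)) = false := by
        simp [hmt]
      rw [List.filter_cons, hPh]
      simp only [Bool.false_eq_true, if_false, gapPairs, if_neg hgap, List.nil_append]
      rw [hrec]

-- B's end-boundary filter over the tail of the strictly sorted unique list picks the gaps' right present values
theorem ends_filter (memb : Int → Bool) (mn : Int) :
    ∀ (t : List Int) (p : Int),
    (p :: t).Pairwise (· < ·) →
    (∀ z, p ≤ z → (memb z = true ↔ z ∈ p :: t)) →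
    (∀ y ∈ t, mn < y) →
    t.filter (fun y => y != mn && ! memb (y - 1))
      = (gapPairs p t).map (fun q => q.2) := by
  intro t
  induction t with
  | nil => intro p _ _ _; simp [gapPairs]
  | cons b rest ih =>
    intro p hpw hmemb hmn
    have hb : p < b := (List.pairwise_cons.mp hpw).1 b (by simp)
    have hrest : ∀ y ∈ rest, b < y := fun y hy =>
      (List.pairwise_cons.mp (List.pairwise_cons.mp hpw).2).1 y hy
    have hbmn : b ≠ mn := by have := hmn b (by simp); omega
    have hm1 : memb (b - 1) = true ↔ b - 1 = p := by
      rw [hmemb (b - 1) (by omega)]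
      constructor
      · intro hmem
        rcases List.mem_cons.mp hmem with heq | hmem
        · exact heq
        · rcases List.mem_cons.mp hmem with heq | hmem
          · omega
          · have := hrest _ hmem; omega
      · intro he; simp [he]
    have hrec := ih b (List.pairwise_cons.mp hpw).2
      (fun z hz => by
        rw [hmemb z (by omega)]
        constructor
        · intro hmem
          rcases List.mem_cons.mp hmem with heq | hmem
          · omega
          · exact hmem
        · intro hmem; exact List.mem_cons_of_mem _ hmem)
      (fun y hy => hmn y (List.mem_cons_of_mem _ hy))
    by_cases hgap : b - p > 1
    · have hmf : memb (b - 1) = false := by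
        rcases Bool.eq_false_or_eq_true (memb (b - 1)) with ht | hf
        · exfalso; have := hm1.mp ht; omega
        · exact hf
      have hPb : ((b != mn) && ! memb (b - 1)) = true := by
        simp [hbmn, hmf]
      rw [List.filter_cons, hPb]
      simp only [if_true, gapPairs, if_pos hgap, List.singleton_append, List.map_cons]
      rw [hrec]
    · have hmt : memb (b - 1) = true := hm1.mpr (by omega)
      have hPb : ((b != mn) && ! memb (b - 1)) = false := by
        simp [hmt]
      rw [List.filter_cons, hPb]
      simp only [Bool.false_eq_true, if_false, gapPairs, if_neg hgap, List.nil_append]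
      rw [hrec]

-- the strictly sorted filtered boundary lists need no re-sorting
theorem sorted_filter_map (s u : List Int) (P : Int → Bool) (f : Int → Int)
    (hperm : u.Perm s) (hpw : u.Pairwise (· < ·))
    (hmono : ∀ a b : Int, a < b → f a < f b) :
    PySem.List.sorted ((s.filter P).map f) (fun x => x) false = (u.filter P).map f := by
  apply PySem.List.sorted_eq_of_perm_of_pairwise_lt
  · exact (hperm.filter P).map f
  · exact List.pairwise_map.mpr ((hpw.filter P).imp (fun hab => hmono _ _ hab))

theorem summarize_gaps_spec : Claim_equal_summarize_gaps := by
  intro ts _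
  unfold Spec_summarize_gaps summarize_gaps summarize_gaps_alt
  simp only [PySem.List.slice_from_one]
  set s := PySem.Set.ofList ts with hs
  by_cases hse : s = []
  · rw [hse]
    rfl
  · rw [if_neg hse]
    obtain ⟨h, t, hu⟩ : ∃ h t, PySem.List.sorted s (fun x => x) false = h :: t := by
      rcases hul : PySem.List.sorted s (fun x => x) false with _ | ⟨h, t⟩
      · rw [PySem.List.sorted_eq_nil_iff] at hul; exact absurd hul hse
      · exact ⟨h, t, rfl⟩
    have hpw : (h :: t).Pairwise (· < ·) := by
      rw [← hu]; exact PySem.List.sorted_ofList_pairwise_lt (xs := ts)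
    have hperm : (h :: t).Perm s := by rw [← hu]; exact PySem.List.sorted_perm _ _ _
    have hmemu : ∀ z : Int, z ∈ s ↔ z ∈ h :: t := fun z => (hperm.mem_iff).symm
    obtain ⟨mn, hmn⟩ : ∃ mn, PySem.List.min? s (fun x => x) = some mn := by
      rcases hm : PySem.List.min? s (fun x => x) with _ | mn
      · rw [PySem.List.min?_eq_none_iff] at hm; exact absurd hm hse
      · exact ⟨mn, rfl⟩
    obtain ⟨mx, hmx⟩ : ∃ mx, PySem.List.max? s (fun x => x) = some mx := by
      rcases hm : PySem.List.max? s (fun x => x) with _ | mx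
      · rw [PySem.List.max?_eq_none_iff] at hm; exact absurd hm hse
      · exact ⟨mx, rfl⟩
    simp only [hmn, hmx]
    have hmnmem : mn ∈ h :: t := (hmemu mn).mp (PySem.List.min?_mem hmn)
    have hmnle : ∀ y ∈ h :: t, mn ≤ y := fun y hy =>
      PySem.List.min?_isMin hmn y ((hmemu y).mpr hy)
    have hmxmem : mx ∈ h :: t := (hmemu mx).mp (PySem.List.max?_mem hmx)
    have hmxge : ∀ y ∈ h :: t, y ≤ mx := fun y hy =>
      PySem.List.max?_isMax hmx y ((hmemu y).mpr hy)
    have hmn_head : mn = h := by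
      rcases List.mem_cons.mp hmnmem with heq | hmem
      · exact heq
      · have h1 : h < mn := (List.pairwise_cons.mp hpw).1 mn hmem
        have h2 : mn ≤ h := hmnle h (by simp)
        omega
    have hcont : ∀ z : Int, s.contains z = true ↔ z ∈ h :: t := fun z => by
      simpa using hmemu z
    -- the start-boundary list
    have hstarts_u : (h :: t).filter (fun x => x != mx && ! s.contains (x + 1))
        = (gapPairs h t).map (fun q => q.1) :=
      starts_filter (fun z => s.contains z) mx t h hpw (fun z _ => hcont z) hmxmem hmxge
    have hstarts : PySem.List.sorted
        ((s.filter (fun x => x != mx && ! s.contains (x + 1))).map (fun x => x + 1))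
        (fun x => x) false
        = (gapPairs h t).map (fun q => q.1 + 1) := by
      rw [sorted_filter_map s (h :: t) _ _ hperm hpw (fun a b hab => by omega),
          hstarts_u, List.map_map]
      rfl
    -- the end-boundary list: the head h (= mn) is rejected by the filter
    have hends_u : (h :: t).filter (fun y => y != mn && ! s.contains (y - 1))
        = (gapPairs h t).map (fun q => q.2) := by
      rw [List.filter_cons]
      have hh : (h != mn) = false := by simp [hmn_head]
      simp only [hh, Bool.false_and, if_neg (Bool.false_ne_true)]
      exact ends_filter (fun z => s.contains z) mn t h hpw (fun z _ => hcont z)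
        (fun y hy => by
          have := (List.pairwise_cons.mp hpw).1 y hy
          omega)
    have hends : PySem.List.sorted
        ((s.filter (fun y => y != mn && ! s.contains (y - 1))).map (fun y => y - 1))
        (fun x => x) false
        = (gapPairs h t).map (fun q => q.2 - 1) := by
      rw [sorted_filter_map s (h :: t) _ _ hperm hpw (fun a b hab => by omega),
          hends_u, List.map_map]
      rfl
    -- both gap lists coincide
    rw [hu, hstarts, hends]
    rw [show (h :: t).tail = t from rfl, foldl_zip_eq_gapPairs t h [], List.nil_append]
    rw [List.zip_map', List.map_map]
    rfl
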